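-- pv_equiv track=rewrite | github.com/AnkushGuptaQA/PythonforDQE12 | functions.py | get_max_value_indices
-- ===== SOURCE A (Python) =====
-- from typing import List, Dict, Tuple
--
-- def get_max_value_indices(dicts_list: List[Dict[str, int]]) -> Dict[str, Tuple[int, int]]:
--     """Returns a dictionary mapping each key to max_value, dict_index_with_max_value."""
--     common_dict = {}
--     for dict_index, single_dict in enumerate(dicts_list):
--         for key, value in single_dict.items():
--             if key in common_dict:
--                 current_value, max_index = common_dict[key]
--                 if value > current_value:
--                     common_dict[key] = (value, dict_index + 1)
--             else:
--                 common_dict[key] = (value, dict_index + 1)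
--     return common_dict
-- ===== SOURCE B (Python) =====
-- def get_max_value_indices(dicts_list):
--     """Group-then-reduce: collect (value, dict_index) pairs per key, then pick each key's first maximal pair."""
--     groups = {}
--     for dict_index, single_dict in enumerate(dicts_list, start=1):
--         for key, value in single_dict.items():
--             groups.setdefault(key, []).append((value, dict_index))
--     return {key: max(pairs, key=lambda p: p[0]) for key, pairs in groups.items()}
-- ===== Notes on version B (the rewrite author's own statement) =====
-- stated objective: alternative
-- what changed: A keeps a running (max, index) per key updated in one stream; B first groups all (value, dict_index) pairs per key with enumerate+setdefault, then reduces each group with max(pairs, key=first component), which picks the earliest index on ties just like A's strict-> update.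
import Mathlib
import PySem

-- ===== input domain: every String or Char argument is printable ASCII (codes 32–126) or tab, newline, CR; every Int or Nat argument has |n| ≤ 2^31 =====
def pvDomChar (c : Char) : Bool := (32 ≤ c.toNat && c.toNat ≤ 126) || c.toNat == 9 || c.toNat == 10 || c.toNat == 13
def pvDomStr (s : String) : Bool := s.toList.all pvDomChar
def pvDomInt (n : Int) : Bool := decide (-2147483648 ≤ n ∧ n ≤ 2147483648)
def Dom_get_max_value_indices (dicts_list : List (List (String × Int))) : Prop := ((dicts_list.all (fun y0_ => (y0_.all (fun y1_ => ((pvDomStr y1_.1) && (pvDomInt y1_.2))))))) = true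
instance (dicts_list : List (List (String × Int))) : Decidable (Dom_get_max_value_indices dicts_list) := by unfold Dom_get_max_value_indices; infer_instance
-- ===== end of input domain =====

-- B replaces A's running-max stream over a single dict by a group-then-reduce decomposition
-- (collect each key's (value, index) pairs, then take the first maximum per key); same cost, alternative structure.

-- ===== PORT A =====
def get_max_value_indices (dicts_list : List (List (String × Int))) : List (String × Int × Int) :=
  ((PySem.List.enumerate dicts_list 0).foldl
    (fun common_dict p =>
      p.2.foldl (fun common_dict kv =>
        if common_dict.contains kv.1 then
          -- current_value, max_index = common_dict[key]  (key is present here)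
          if kv.2 > (common_dict.getD kv.1 (0, 0)).1 then
            common_dict.insert kv.1 (kv.2, p.1 + 1)
          else common_dict
        else common_dict.insert kv.1 (kv.2, p.1 + 1)) common_dict)
    PySem.Dict.empty).items

-- ===== PORT B =====
def get_max_value_indices_alt (dicts_list : List (List (String × Int))) : List (String × Int × Int) :=
  let groups : PySem.Dict String (List (Int × Int)) :=
    (PySem.List.enumerate dicts_list 1).foldl
      (fun groups p =>
        p.2.foldl (fun groups kv => groups.modify kv.1 [] (· ++ [(kv.2, p.1)])) groups)
      PySem.Dict.empty
  -- {key: max(pairs, key=lambda q: q[0]) for key, pairs in groups.items()}  (pairs is never empty)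
  groups.items.map (fun p => (p.1,
    match PySem.List.max? p.2 (fun q => q.1) with
    | some m => m
    | none => (0, 0)))

-- ===== PRECONDITION & SPEC =====
def Spec_get_max_value_indices (dicts_list : List (List (String × Int))) (out : List (String × Int × Int)) : Prop := out = get_max_value_indices_alt dicts_list
instance (dicts_list : List (List (String × Int))) (out : List (String × Int × Int)) : Decidable (Spec_get_max_value_indices dicts_list out) := by unfold Spec_get_max_value_indices; infer_instance

-- ===== CLAIM (what is proved, stated in full; the proofs are below) =====
def Claim_equal_get_max_value_indices : Prop := ∀ (dicts_list : List (List (String × Int))), Dom_get_max_value_indices dicts_list → Spec_get_max_value_indices dicts_list (get_max_value_indices dicts_list)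

-- ===== LEMMAS AND PROOFS =====

def pvStepA (d : PySem.Dict String (Int × Int)) (t : String × Int × Int) : PySem.Dict String (Int × Int) :=
  if d.contains t.1 then
    if t.2.1 > (d.getD t.1 (0, 0)).1 then d.insert t.1 (t.2.1, t.2.2) else d
  else d.insert t.1 (t.2.1, t.2.2)

def pvStepG (g : PySem.Dict String (List (Int × Int))) (t : String × Int × Int) : PySem.Dict String (List (Int × Int)) :=
  g.modify t.1 [] (· ++ [t.2])

def pvBmax (ps : List (Int × Int)) : Int × Int :=
  match PySem.List.max? ps (fun q => q.1) with
  | some m => m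
  | none => (0, 0)

def pvMapVal (g : PySem.Dict String (List (Int × Int))) : PySem.Dict String (Int × Int) :=
  PySem.Dict.mk (g.items.map (fun p => (p.1, pvBmax p.2)))

def pvFlat (dicts_list : List (List (String × Int))) : List (String × Int × Int) :=
  (PySem.List.enumerate dicts_list 1).flatMap (fun p => p.2.map (fun kv => (kv.1, kv.2, p.1)))

lemma pv_enumerate_shift {α : Type} (xs : List α) (s : Int) :
    PySem.List.enumerate xs (s + 1) = (PySem.List.enumerate xs s).map (fun p => (p.1 + 1, p.2)) := by
  induction xs generalizing s with
  | nil => simp [PySem.List.enumerate_nil]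
  | cons x t ih =>
    simp [PySem.List.enumerate_cons, ih (s + 1)]

lemma pv_portA_flat (dl : List (List (String × Int))) :
    get_max_value_indices dl = ((pvFlat dl).foldl pvStepA PySem.Dict.empty).items := by
  unfold get_max_value_indices pvFlat
  rw [show (1 : Int) = 0 + 1 from rfl, pv_enumerate_shift]
  simp [List.foldl_flatMap, List.foldl_map, pvStepA]

lemma pv_portB_flat (dl : List (List (String × Int))) :
    get_max_value_indices_alt dl = (pvMapVal ((pvFlat dl).foldl pvStepG PySem.Dict.empty)).items := by
  unfold get_max_value_indices_alt pvFlat pvMapVal pvBmax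
  simp [List.foldl_flatMap, List.foldl_map, pvStepG]

lemma pv_keys_mapVal (g : PySem.Dict String (List (Int × Int))) : (pvMapVal g).keys = g.keys := by
  simp [pvMapVal, PySem.Dict.keys]

lemma pv_contains_mapVal (g : PySem.Dict String (List (Int × Int))) (k : String) :
    (pvMapVal g).contains k = g.contains k := by
  rw [PySem.Dict.contains_eq_decide_mem_keys, PySem.Dict.contains_eq_decide_mem_keys, pv_keys_mapVal]

lemma pv_items_mk {κ ν : Type} [BEq κ] (l : List (κ × ν)) : (PySem.Dict.mk l).items = l := rfl

lemma pv_bmax_append (ps : List (Int × Int)) (x : Int × Int) (hps : ps ≠ []) :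
    pvBmax (ps ++ [x]) = if (pvBmax ps).1 < x.1 then x else pvBmax ps := by
  obtain ⟨m, hm⟩ : ∃ m, PySem.List.max? ps (fun q => q.1) = some m := by
    cases h : PySem.List.max? ps (fun q => q.1) with
    | none => exact absurd ((PySem.List.max?_eq_none_iff ps _).mp h) hps
    | some m => exact ⟨m, rfl⟩
  have happ : PySem.List.max? (ps ++ [x]) (fun q => q.1)
      = if m.1 < x.1 then some x else some m := by
    unfold PySem.List.max? at hm ⊢
    rw [List.foldl_append, hm]
    simp [List.foldl]
  by_cases hlt : m.1 < x.1 <;> simp [pvBmax, happ, hm, hlt]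

lemma pv_step_lemma (g : PySem.Dict String (List (Int × Int))) (t : String × Int × Int)
    (hn : g.keys.Nodup) (hne : ∀ p ∈ g.items, p.2 ≠ []) :
    pvStepA (pvMapVal g) t = pvMapVal (pvStepG g t) := by
  by_cases hc : g.contains t.1
  · -- key already present
    obtain ⟨ps, hget⟩ : ∃ ps, g.get? t.1 = some ps := by
      cases h : g.get? t.1 with
      | none => rw [(PySem.Dict.get?_eq_none_iff_contains g t.1).mp h] at hc; simp at hc
      | some v => exact ⟨v, rfl⟩
    have hmem : (t.1, ps) ∈ g.items := PySem.Dict.mem_items_of_get?_eq_some g hget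
    have hps : ps ≠ [] := hne _ hmem
    have hgd : g.getD t.1 [] = ps := PySem.Dict.getD_of_get?_eq_some g _ hget
    have hmvmem : (t.1, pvBmax ps) ∈ (pvMapVal g).items := by
      simpa [pvMapVal] using List.mem_map_of_mem (f := fun p => (p.1, pvBmax p.2)) hmem
    have hnmv : (pvMapVal g).keys.Nodup := by rw [pv_keys_mapVal]; exact hn
    have hgdmv : (pvMapVal g).getD t.1 (0, 0) = pvBmax ps :=
      PySem.Dict.getD_of_mem_items _ hmvmem hnmv _
    have huniq : ∀ p ∈ g.items, p.1 = t.1 → p = (t.1, ps) := by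
      intro p hp hpk
      have := PySem.Dict.get?_of_mem_items g (k := p.1) (v := p.2) (by simpa using hp) hn
      rw [hpk, hget] at this
      cases p; simp_all
    have hcv : (pvMapVal g).contains t.1 = true := by rw [pv_contains_mapVal]; exact hc
    have hstepG : pvStepG g t = g.insert t.1 (ps ++ [t.2]) := by
      simp [pvStepG, PySem.Dict.modify, hgd]
    rw [hstepG]
    unfold pvStepA
    rw [hcv, hgdmv]
    by_cases hv : t.2.1 > (pvBmax ps).1
    · rw [if_pos rfl, if_pos hv]
      apply PySem.Dict.ext
      rw [PySem.Dict.items_insert_of_contains _ _ hcv]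
      simp only [pvMapVal, pv_items_mk]
      rw [PySem.Dict.items_insert_of_contains _ _ hc]
      simp only [List.map_map]
      apply List.map_congr_left
      intro p hp
      by_cases hpk : p.1 = t.1
      · have hpe := huniq p hp hpk
        subst hpe
        simp [pv_bmax_append ps t.2 hps, hv]
      · simp [hpk]
    · rw [if_pos rfl, if_neg hv]
      apply PySem.Dict.ext
      simp only [pvMapVal, pv_items_mk]
      rw [PySem.Dict.items_insert_of_contains _ _ hc]
      simp only [List.map_map]
      apply List.map_congr_left
      intro p hp
      by_cases hpk : p.1 = t.1
      · have hpe := huniq p hp hpk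
        subst hpe
        have : ¬ (pvBmax ps).1 < t.2.1 := hv
        simp [pv_bmax_append ps t.2 hps, this]
      · simp [hpk]
  · -- new key: both sides append it
    have hcb : g.contains t.1 = false := by simpa using hc
    have hcv : (pvMapVal g).contains t.1 = false := by rw [pv_contains_mapVal]; exact hcb
    have hgd : g.getD t.1 [] = [] := PySem.Dict.getD_of_not_contains g _ hcb
    have hstepG : pvStepG g t = g.insert t.1 [t.2] := by
      simp [pvStepG, PySem.Dict.modify, hgd]
    rw [hstepG]
    unfold pvStepA
    rw [hcv]
    simp only [Bool.false_eq_true, if_false]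
    apply PySem.Dict.ext
    rw [PySem.Dict.items_insert_of_not_contains _ _ hcv]
    simp only [pvMapVal, pv_items_mk]
    rw [PySem.Dict.items_insert_of_not_contains _ _ hcb]
    simp [pvBmax, PySem.List.max?]

lemma pv_main (l : List (String × Int × Int)) :
    ∀ (g : PySem.Dict String (List (Int × Int))), g.keys.Nodup → (∀ p ∈ g.items, p.2 ≠ []) →
    l.foldl pvStepA (pvMapVal g) = pvMapVal (l.foldl pvStepG g) := by
  induction l with
  | nil => intro g _ _; rfl
  | cons t l ih =>
    intro g hn hne
    rw [List.foldl_cons, List.foldl_cons, pv_step_lemma g t hn hne]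
    apply ih
    · -- keys stay Nodup through modify (= insert)
      simp only [pvStepG, PySem.Dict.modify]
      exact PySem.Dict.nodup_keys_insert _ _ _ hn
    · intro p hp
      simp only [pvStepG, PySem.Dict.modify] at hp
      rcases (PySem.Dict.mem_items_insert _ _ _ _).mp hp with h | ⟨h, _⟩
      · subst h; simp
      · exact hne _ h

-- ===== VERDICT (by name: the statement is the Claim_ definition above) =====
theorem get_max_value_indices_spec : Claim_equal_get_max_value_indices := by
  intro dl _
  unfold Spec_get_max_value_indices
  rw [pv_portA_flat, pv_portB_flat]
  have h := pv_main (pvFlat dl) PySem.Dict.empty PySem.Dict.nodup_keys_empty (by simp [PySem.Dict.empty])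
  have hempty : pvMapVal PySem.Dict.empty = PySem.Dict.empty := rfl
  rw [hempty] at h
  rw [h]
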